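-- pv_equiv track=rewrite | github.com/mahomahomaho/KivEnt | examples/17-concave-phys-objects/concave2convex.py | bisect_iter
-- ===== SOURCE A (Python) =====
-- def bisect_iter(ilist):
--     if len(ilist) <= 2:
--         for x in ilist:
--             yield x
--         return
--
--     mid = int(len(ilist)/2)
--     yield ilist[mid]
--
--     for x in bisect_iter(ilist[:mid]):
--         yield x
--
--     for x in bisect_iter(ilist[mid + 1:]):
--         yield x
-- ===== SOURCE B (Python) =====
-- def bisect_iter(ilist):
--     stack = [(0, len(ilist))]
--     while stack:
--         lo, hi = stack.pop()
--         if hi - lo <= 2: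
--             for x in ilist[lo:hi]:
--                 yield x
--         else:
--             mid = lo + (hi - lo) // 2
--             yield ilist[mid]
--             stack.append((mid + 1, hi))
--             stack.append((lo, mid))
-- ===== Notes on version B (the rewrite author's own statement) =====
-- stated objective: alternative
-- what changed: Replaces the recursive generator that slices and re-yields sublists with an iterative explicit stack of half-open index ranges popped LIFO, emitting elements by index with no recursion and no slice copies of the recursive halves.
import Mathlib
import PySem

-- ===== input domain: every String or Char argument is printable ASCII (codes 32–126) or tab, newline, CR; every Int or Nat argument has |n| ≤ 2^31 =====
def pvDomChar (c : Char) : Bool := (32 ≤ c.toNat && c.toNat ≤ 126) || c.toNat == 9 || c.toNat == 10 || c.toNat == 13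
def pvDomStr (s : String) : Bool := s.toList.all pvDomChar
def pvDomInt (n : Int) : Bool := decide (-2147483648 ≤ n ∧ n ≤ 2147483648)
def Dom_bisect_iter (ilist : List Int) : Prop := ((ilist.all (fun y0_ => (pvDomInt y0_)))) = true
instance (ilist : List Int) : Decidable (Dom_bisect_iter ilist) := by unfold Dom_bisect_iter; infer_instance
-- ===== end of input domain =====

-- B replaces A's recursive sliced generator by an iterative explicit stack of index ranges (alternative decomposition, same output).

-- ===== PORT A =====
-- Recursive preorder: mid element, then left slice, then right slice.
-- ilist[:mid] = take mid and ilist[mid+1:] = drop (mid+1) are exact for these nonnegative indices;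
-- ilist[mid] is in range (length > 2 so mid < length), ported as getD.
def bisect_iter (ilist : List Int) : List Int :=
  if ilist.length ≤ 2 then ilist
  else
    let mid := ilist.length / 2
    ilist.getD mid 0 :: (bisect_iter (ilist.take mid) ++ bisect_iter (ilist.drop (mid + 1)))
termination_by ilist.length
decreasing_by
  · simp; omega
  · simp; omega

-- ===== PORT B =====
-- Explicit LIFO stack of half-open ranges (top of stack = head of list; 'append x; append y' = y :: x :: rest).
def bmeasure (st : List (Nat × Nat)) : Nat := (st.map (fun p => 2 * (p.2 - p.1) + 1)).sum

def bstep (st : List (Nat × Nat)) (ilist : List Int) : List Int :=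
  match st with
  | [] => []
  | (lo, hi) :: rest =>
    if hi - lo ≤ 2 then
      ((ilist.drop lo).take (hi - lo)) ++ bstep rest ilist   -- ilist[lo:hi], exact for 0 ≤ lo ≤ hi ≤ len
    else
      let mid := lo + (hi - lo) / 2
      ilist.getD mid 0 :: bstep ((lo, mid) :: (mid + 1, hi) :: rest) ilist
termination_by bmeasure st
decreasing_by
  · simp [bmeasure]
  · simp [bmeasure]; omega

def bisect_iter_alt (ilist : List Int) : List Int :=
  bstep [(0, ilist.length)] ilist

-- ===== PRECONDITION & SPEC =====
def Spec_bisect_iter (ilist : List Int) (out : List Int) : Prop := out = bisect_iter_alt ilist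
instance (ilist : List Int) (out : List Int) : Decidable (Spec_bisect_iter ilist out) := by unfold Spec_bisect_iter; infer_instance

-- ===== CLAIM (what is proved, stated in full; the proofs are below) =====
def Claim_equal_bisect_iter : Prop := ∀ (ilist : List Int), Dom_bisect_iter ilist → Spec_bisect_iter ilist (bisect_iter ilist)

-- ===== LEMMAS AND PROOFS =====

-- The stack loop emits, for each pending range, exactly A's recursion on that segment.
theorem bstep_eq (st : List (Nat × Nat)) (ilist : List Int)
    (hb : ∀ p ∈ st, p.1 ≤ p.2 ∧ p.2 ≤ ilist.length) :
    bstep st ilist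
      = (st.map (fun p => bisect_iter ((ilist.drop p.1).take (p.2 - p.1)))).flatten := by
  fun_induction bstep st ilist with
  | case1 => simp
  | case2 lo hi rest hle ih =>
    have hlohi := (hb (lo, hi) (by simp)).1
    have hhi := (hb (lo, hi) (by simp)).2
    have hlen : ((ilist.drop lo).take (hi - lo)).length = hi - lo := by
      simp; omega
    rw [ih (fun p hp => hb p (by simp [hp]))]
    simp only [List.map_cons, List.flatten_cons]
    congr 1
    rw [bisect_iter]
    simp [hlen, hle]
  | case3 lo hi rest hgt mid ih =>
    have hlohi := (hb (lo, hi) (by simp)).1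
    have hhi := (hb (lo, hi) (by simp)).2
    have hmid : mid = lo + (hi - lo) / 2 := rfl
    have hb' : ∀ p ∈ ((lo, mid) :: (mid + 1, hi) :: rest),
        p.1 ≤ p.2 ∧ p.2 ≤ ilist.length := by
      intro p hp
      simp only [List.mem_cons] at hp
      rcases hp with rfl | rfl | hp
      · simp; omega
      · simp; omega
      · exact hb p (by simp [hp])
    rw [ih hb']
    have hlen : (List.take (hi - lo) (List.drop lo ilist)).length = hi - lo := by
      simp; omega
    have hA : bisect_iter (List.take (hi - lo) (List.drop lo ilist))
        = (List.take (hi - lo) (List.drop lo ilist)).getD ((hi - lo) / 2) 0 ::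
          (bisect_iter ((List.take (hi - lo) (List.drop lo ilist)).take ((hi - lo) / 2)) ++
           bisect_iter ((List.take (hi - lo) (List.drop lo ilist)).drop ((hi - lo) / 2 + 1))) := by
      rw [bisect_iter]; simp [hlen]; omega
    have h1 : (List.take (hi - lo) (List.drop lo ilist)).getD ((hi - lo) / 2) 0
        = ilist.getD mid 0 := by
      simp only [List.getD, hmid]
      rw [List.getElem?_take_of_lt (by omega), List.getElem?_drop]
    have h2 : (List.take (hi - lo) (List.drop lo ilist)).take ((hi - lo) / 2)
        = List.take (mid - lo) (List.drop lo ilist) := by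
      rw [List.take_take]; congr 1; omega
    have h3 : (List.take (hi - lo) (List.drop lo ilist)).drop ((hi - lo) / 2 + 1)
        = List.take (hi - (mid + 1)) (List.drop (mid + 1) ilist) := by
      rw [List.drop_take, List.drop_drop]
      congr 1
      omega
    simp only [List.map_cons, List.flatten_cons, hA, h1, h2, h3, List.cons_append,
      List.append_assoc]

-- ===== VERDICT (by name: the statement is the Claim_ definition above) =====
theorem bisect_iter_spec : Claim_equal_bisect_iter := by
  intro ilist _
  unfold Spec_bisect_iter bisect_iter_alt
  rw [bstep_eq _ _ (by intro p hp; simp at hp; subst hp; simp)]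
  simp
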